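-- pv_equiv track=rewrite | github.com/JisungKim94/CodingTest | Programmers/Python/lessons_135807_숫자카드나누기_최대공약수_최소공배수_gcd_lcm_asterisk_reduce.py | isdev
-- ===== SOURCE A (Python) =====
-- def isdev(temp, array):
--     res = 1
--     cnt = 0
--     for i in temp:
--         for j in array:
--             if j % i == 0:
--                 res = i
--                 cnt = cnt + 1
--             else:
--                 res = 1
--                 cnt = 0
--                 break
--         if cnt == len(array):
--             break
--     return res
-- ===== SOURCE B (Python) =====
-- def isdev(temp, array):
--     g = 0
--     for j in array:
--         while j:
--             g, j = j, g % j
--     for i in temp: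
--         if g % i == 0:
--             return i
--     return 1
-- ===== Notes on version B (the rewrite author's own statement) =====
-- stated objective: alternative
-- what changed: B computes the gcd of array once with a single Euclid pass and returns the first element of temp dividing that gcd, instead of A's per-candidate rescan of array; same measured cost on the generated inputs (A's inner scan breaks early), but worst-case O(|temp|*|array|) becomes O(|array| log M + |temp|).
-- outside the precondition, e.g. on isdev([2], []): A returns 1, B returns 2
import Mathlib
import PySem

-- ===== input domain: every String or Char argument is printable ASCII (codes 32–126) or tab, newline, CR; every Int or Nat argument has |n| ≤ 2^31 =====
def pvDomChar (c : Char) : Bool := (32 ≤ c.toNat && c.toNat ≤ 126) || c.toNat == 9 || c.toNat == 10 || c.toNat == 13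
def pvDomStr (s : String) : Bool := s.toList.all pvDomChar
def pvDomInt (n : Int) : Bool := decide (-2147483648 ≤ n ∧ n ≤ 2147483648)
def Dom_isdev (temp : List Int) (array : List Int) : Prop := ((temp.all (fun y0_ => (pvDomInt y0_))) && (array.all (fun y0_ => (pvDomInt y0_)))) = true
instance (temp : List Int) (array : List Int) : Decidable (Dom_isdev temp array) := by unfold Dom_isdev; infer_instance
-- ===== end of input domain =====

-- B is an alternative algorithm: one Euclid-gcd pass over array, then the first element of temp
-- dividing that gcd, instead of A's per-candidate rescan of array (neither program mutates its arguments).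

-- ===== PORT A =====
-- inner 'for j in array' loop: state (res, cnt); 'break' returns (1, 0)
def isdevInner (i : Int) : List Int → Int → Int → Int × Int
  | [], res, cnt => (res, cnt)
  | j :: rest, _, cnt =>
    if PySem.Int.mod j i = 0 then isdevInner i rest i (cnt + 1) else (1, 0)

-- outer 'for i in temp' loop: carries (res, cnt) across iterations; 'break' returns res
def isdevLoop (array : List Int) : List Int → Int → Int → Int
  | [], res, _ => res
  | i :: rest, res, cnt =>
    let rc := isdevInner i array res cnt
    if rc.2 = PySem.List.len array then rc.1 else isdevLoop array rest rc.1 rc.2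

def isdev (temp : List Int) (array : List Int) : Int := isdevLoop array temp 1 0

-- ===== PORT B =====
-- termination of the 'while j:' Euclid loop: |g % j| < |j| (Python mod has the divisor's sign)
theorem pvModNatAbsLt (g j : Int) (h : j ≠ 0) : (PySem.Int.mod g j).natAbs < j.natAbs := by
  rcases lt_or_gt_of_ne h with hneg | hpos
  · have := PySem.Int.mod_neg_bounds (a := g) hneg
    omega
  · have h1 := PySem.Int.mod_nonneg (a := g) hpos
    have h2 := PySem.Int.mod_lt (a := g) hpos
    omega

-- 'while j: g, j = j, g % j'
def pvEuclid (g j : Int) : Int :=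
  if h : j = 0 then g else pvEuclid j (PySem.Int.mod g j)
termination_by j.natAbs
decreasing_by exact pvModNatAbsLt g j h

-- 'for j in array: …' accumulating g (g starts at 0)
def pvGcdFold : List Int → Int → Int
  | [], g => g
  | j :: rest, g => pvGcdFold rest (pvEuclid g j)

-- 'for i in temp: if g % i == 0: return i' / 'return 1'
def pvFind (g : Int) : List Int → Int
  | [] => 1
  | i :: rest => if PySem.Int.mod g i = 0 then i else pvFind g rest

def isdev_alt (temp : List Int) (array : List Int) : Int := pvFind (pvGcdFold array 0) temp

-- ===== PRECONDITION & SPEC =====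
-- Pre_ excludes exactly the inputs where A raises ZeroDivisionError (a 0 in temp reached before any
-- common divisor of array) and the empty array, on which A's 1 (its initial res) and B's
-- first-temp-element are both defensible vacuous answers.
def Pre_isdev (temp : List Int) (array : List Int) : Prop :=
  array ≠ [] ∧ ∀ k < temp.length, temp.getD k 1 = 0 → ∃ m < k, ∀ j ∈ array, temp.getD m 1 ∣ j
instance (temp : List Int) (array : List Int) : Decidable (Pre_isdev temp array) := by unfold Pre_isdev; infer_instance
def pvWitness_isdev : List Int × List Int := ([3, 2], [4, 6])

def Spec_isdev (temp : List Int) (array : List Int) (out : Int) : Prop := out = isdev_alt temp array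
instance (temp : List Int) (array : List Int) (out : Int) : Decidable (Spec_isdev temp array out) := by unfold Spec_isdev; infer_instance

-- ===== CLAIM (what is proved, stated in full; the proofs are below) =====
def Claim_equal_isdev : Prop := ∀ (temp : List Int) (array : List Int), Dom_isdev temp array → Pre_isdev temp array → Spec_isdev temp array (isdev temp array)

-- ===== LEMMAS AND PROOFS =====

-- divisors of pvEuclid g j are exactly the common divisors of g and j
theorem pvDvdEuclid (d : Int) : ∀ (n : Nat) (g j : Int), j.natAbs ≤ n →
    (d ∣ pvEuclid g j ↔ d ∣ g ∧ d ∣ j) := by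
  intro n
  induction n with
  | zero =>
    intro g j hj
    have hj0 : j = 0 := by omega
    subst hj0
    rw [pvEuclid]
    simp
  | succ n ih =>
    intro g j hj
    by_cases h0 : j = 0
    · subst h0
      rw [pvEuclid]
      simp
    · rw [pvEuclid]
      simp only [h0, dite_false]
      have hlt := pvModNatAbsLt g j h0
      rw [ih j (PySem.Int.mod g j) (by omega)]
      have hid := PySem.Int.floordiv_mul_add_mod g j
      constructor
      · rintro ⟨h1, h2⟩
        exact ⟨by rw [← hid]; exact dvd_add (Dvd.dvd.mul_left h1 _) h2, h1⟩
      · rintro ⟨h1, h2⟩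
        refine ⟨h2, ?_⟩
        have : PySem.Int.mod g j = g - PySem.Int.floordiv g j * j := by omega
        rw [this]
        exact dvd_sub h1 (Dvd.dvd.mul_left h2 _)

theorem pvDvdGcdFold (d : Int) : ∀ (arr : List Int) (g : Int),
    (d ∣ pvGcdFold arr g ↔ d ∣ g ∧ ∀ j ∈ arr, d ∣ j) := by
  intro arr
  induction arr with
  | nil => simp [pvGcdFold]
  | cons j rest ih =>
    intro g
    rw [pvGcdFold, ih, pvDvdEuclid d (j.natAbs) g j le_rfl]
    constructor
    · rintro ⟨⟨h1, h2⟩, h3⟩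
      exact ⟨h1, by simpa [h2] using h3⟩
    · rintro ⟨h1, h2⟩
      exact ⟨⟨h1, h2 j (by simp)⟩, fun x hx => h2 x (by simp [hx])⟩

theorem pvInnerAll (i : Int) : ∀ (arr : List Int) (res cnt : Int),
    arr ≠ [] → (∀ j ∈ arr, i ∣ j) →
    isdevInner i arr res cnt = (i, cnt + (arr.length : Int)) := by
  intro arr
  induction arr with
  | nil => intro _ _ h; exact absurd rfl h
  | cons j rest ih =>
    intro res cnt _ hall
    have hj : PySem.Int.mod j i = 0 :=
      (PySem.Int.mod_eq_zero_iff_dvd j i).2 (hall j (by simp))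
    rw [isdevInner]
    simp only [hj, if_true]
    cases rest with
    | nil => simp [isdevInner]
    | cons y ys =>
      rw [ih i (cnt + 1) (by simp) (fun x hx => hall x (by simp [hx]))]
      simp
      ring
theorem pvInnerNotAll (i : Int) : ∀ (arr : List Int) (res cnt : Int),
    (∃ j ∈ arr, ¬ i ∣ j) → isdevInner i arr res cnt = (1, 0) := by
  intro arr
  induction arr with
  | nil => intro _ _ h; simp at h
  | cons j rest ih =>
    intro res cnt h
    by_cases hj : i ∣ j
    · have hmod : PySem.Int.mod j i = 0 := (PySem.Int.mod_eq_zero_iff_dvd j i).2 hj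
      rw [isdevInner]
      simp only [hmod, if_true]
      apply ih
      rcases h with ⟨x, hx, hnd⟩
      rcases List.mem_cons.1 hx with h1 | h1
      · exact absurd (h1 ▸ hj) hnd
      · exact ⟨x, h1, hnd⟩
    · have hmod : PySem.Int.mod j i ≠ 0 := fun hc => hj ((PySem.Int.mod_eq_zero_iff_dvd j i).1 hc)
      rw [isdevInner]
      simp [hmod]

theorem pvLoopEq (array : List Int) (hne : array ≠ []) :
    ∀ (temp : List Int), isdevLoop array temp 1 0 = pvFind (pvGcdFold array 0) temp := by
  intro temp
  induction temp with
  | nil => rw [isdevLoop, pvFind]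
  | cons i rest ih =>
    by_cases hall : ∀ j ∈ array, i ∣ j
    · -- i divides every array element: A breaks with res = i, B finds i
      have hA := pvInnerAll i array 1 0 hne hall
      have hB : PySem.Int.mod (pvGcdFold array 0) i = 0 :=
        (PySem.Int.mod_eq_zero_iff_dvd _ i).2 ((pvDvdGcdFold i array 0).2 ⟨dvd_zero i, hall⟩)
      rw [isdevLoop, pvFind]
      simp [hA, hB, PySem.List.len_eq]
    · -- some element fails: A resets to (1,0) and continues, B skips i
      have hA := pvInnerNotAll i array 1 0 (by push Not at hall; rcases hall with ⟨x, hx, hnd⟩; exact ⟨x, hx, hnd⟩)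
      have hB : PySem.Int.mod (pvGcdFold array 0) i ≠ 0 := by
        intro hc
        exact hall ((pvDvdGcdFold i array 0).1 ((PySem.Int.mod_eq_zero_iff_dvd _ i).1 hc)).2
      have hlen : ((array.length : Int)) ≠ 0 := by
        simp
        exact hne
      rw [isdevLoop, pvFind]
      simp only [hA, hB, if_false, PySem.List.len_eq]
      rw [if_neg (by omega)]
      exact ih

-- ===== VERDICT (by name: the statement is the Claim_ definition above) =====
theorem isdev_spec : Claim_equal_isdev := by
  intro temp array _ hpre
  unfold Spec_isdev isdev isdev_alt
  exact pvLoopEq array hpre.1 temp
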